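-- pv_equiv track=rewrite | github.com/kdrolet11/ScrabbleWordFinder | Main.py | map_words
-- ===== SOURCE A (Python) =====
-- def map_words(all_words, letter_values):
--     all_words_map = {}
--     for word in all_words:
--         value = 0
--         for letter in word:
--             value += letter_values.get(letter, 0)
--         words = all_words_map.get(value, [])
--         words.append(word.strip('\n'))
--         all_words_map.update({value: words})
--
--     return all_words_map
-- ===== SOURCE B (Python) =====
-- def map_words(all_words, letter_values):
--     # value is computed over the raw word; only the stored word is stripped of '\n'
--     pairs = [(sum(letter_values.get(c, 0) for c in word), word.strip('\n'))
--              for word in all_words]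
--     return {v: [w for (u, w) in pairs if u == v]
--             for v in dict.fromkeys(u for u, _ in pairs)}
-- ===== Notes on version B (the rewrite author's own statement) =====
-- stated objective: alternative
-- what changed: Replaces the one-pass dict-mutation loop by a two-phase decomposition: first a comprehension builds all (value, stripped word) pairs, then the result dict is built by deduplicating the values in first-occurrence order and gathering each group with a filter pass.
import Mathlib
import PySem

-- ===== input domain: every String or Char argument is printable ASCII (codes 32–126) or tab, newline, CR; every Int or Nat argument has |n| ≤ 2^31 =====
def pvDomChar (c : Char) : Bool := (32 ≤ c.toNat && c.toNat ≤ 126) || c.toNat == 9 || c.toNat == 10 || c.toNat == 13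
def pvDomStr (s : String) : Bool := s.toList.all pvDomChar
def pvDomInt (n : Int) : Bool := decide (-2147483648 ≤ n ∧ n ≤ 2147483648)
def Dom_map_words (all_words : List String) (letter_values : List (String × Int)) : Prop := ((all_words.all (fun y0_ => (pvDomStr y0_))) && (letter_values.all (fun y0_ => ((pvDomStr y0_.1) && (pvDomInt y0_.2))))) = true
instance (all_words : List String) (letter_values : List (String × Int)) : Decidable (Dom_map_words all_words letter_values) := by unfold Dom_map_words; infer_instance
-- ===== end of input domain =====

-- B replaces A's one-pass dict-mutation loop by a two-phase decomposition (precompute all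
-- (value, stripped-word) pairs, then dedup the values and gather each group by a filter pass);
-- alternative structure, not claimed faster.

-- ===== PORT A =====
def map_words (all_words : List String) (letter_values : List (String × Int)) : List (Int × List String) :=
  (all_words.foldl
    (fun (all_words_map : PySem.Dict Int (List String)) word =>
      let value := word.toList.foldl
        (fun v letter => v + (PySem.Dict.mk letter_values).getD (String.singleton letter) 0) 0
      let words := all_words_map.getD value []
      all_words_map.insert value (words ++ [PySem.Str.stripChars word "\n"]))
    PySem.Dict.empty).items

-- ===== PORT B =====
def pvWordValue (letter_values : List (String × Int)) (word : String) : Int :=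
  (word.toList.map (fun c => (PySem.Dict.mk letter_values).getD (String.singleton c) 0)).sum

def map_words_alt (all_words : List String) (letter_values : List (String × Int)) : List (Int × List String) :=
  let pairs := all_words.map (fun word => (pvWordValue letter_values word, PySem.Str.stripChars word "\n"))
  (PySem.List.dedup (pairs.map (·.1))).map
    (fun v => (v, (pairs.filter (fun p => p.1 == v)).map (·.2)))

-- ===== PRECONDITION & SPEC =====
def Spec_map_words (all_words : List String) (letter_values : List (String × Int)) (out : List (Int × List String)) : Prop := out = map_words_alt all_words letter_values
instance (all_words : List String) (letter_values : List (String × Int)) (out : List (Int × List String)) : Decidable (Spec_map_words all_words letter_values out) := by unfold Spec_map_words; infer_instance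

-- ===== CLAIM (what is proved, stated in full; the proofs are below) =====
def Claim_equal_map_words : Prop := ∀ (all_words : List String) (letter_values : List (String × Int)), Dom_map_words all_words letter_values → Spec_map_words all_words letter_values (map_words all_words letter_values)

-- ===== LEMMAS AND PROOFS =====

-- A's per-word step, on the pair (value, stripped word), is the modify-grouping step.
theorem pv_group_items (ps : List (Int × String)) :
    (ps.foldl (fun m p => m.insert p.1 (m.getD p.1 [] ++ [p.2]))
        (PySem.Dict.empty : PySem.Dict Int (List String))).items
    = (PySem.List.dedup (ps.map (·.1))).map
        (fun v => (v, (ps.filter (fun p => p.1 == v)).map (·.2))) := by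
  have hm : (fun (m : PySem.Dict Int (List String)) (p : Int × String) =>
        m.insert p.1 (m.getD p.1 [] ++ [p.2]))
      = fun m p => m.modify p.1 [] (· ++ [p.2]) := by
    funext m p; simp [PySem.Dict.modify]
  rw [hm]
  have hnd : (ps.foldl (fun m p => m.modify p.1 [] (· ++ [p.2]))
      (PySem.Dict.empty : PySem.Dict Int (List String))).keys.Nodup :=
    PySem.Dict.nodup_keys_foldl_modify_key ps (·.1) [] (fun m p => (· ++ [p.2])) _ (by simp)
  rw [PySem.Dict.items_eq_map_keys _ hnd []]
  rw [PySem.Dict.keys_foldl_modify_key]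
  have hupd : PySem.Set.update ([] : List Int)
      (ps.map (·.1)) = PySem.List.dedup (ps.map (·.1)) := rfl
  rw [show ((PySem.Dict.empty : PySem.Dict Int (List String)).keys) = ([] : List Int) from rfl, hupd]
  refine List.map_congr_left ?_
  intro v _
  rw [PySem.Dict.getD_foldl_modify_append]
  simp [PySem.Dict.getD_empty]

theorem map_words_eq_fold_pairs (all_words : List String) (letter_values : List (String × Int)) :
    map_words all_words letter_values
    = ((all_words.map (fun word =>
          (pvWordValue letter_values word, PySem.Str.stripChars word "\n"))).foldl
        (fun m p => m.insert p.1 (m.getD p.1 [] ++ [p.2])) PySem.Dict.empty).items := by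
  have hf : (fun (m : PySem.Dict Int (List String)) (word : String) =>
      let value := word.toList.foldl
        (fun v letter => v + (PySem.Dict.mk letter_values).getD (String.singleton letter) 0) 0
      let words := m.getD value []
      m.insert value (words ++ [PySem.Str.stripChars word "\n"]))
      = fun m word => m.insert (pvWordValue letter_values word)
          (m.getD (pvWordValue letter_values word) [] ++ [PySem.Str.stripChars word "\n"]) := by
    funext m word
    have hv : word.toList.foldl
        (fun v letter => v + (PySem.Dict.mk letter_values).getD (String.singleton letter) 0) 0
        = pvWordValue letter_values word := by
      simp [pvWordValue, PySem.List.foldl_add]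
    dsimp only
    rw [hv]
  unfold map_words
  rw [hf, List.foldl_map]

-- ===== VERDICT (by name: the statement is the Claim_ definition above) =====
theorem map_words_spec : Claim_equal_map_words := by
  intro all_words letter_values _
  unfold Spec_map_words map_words_alt
  rw [map_words_eq_fold_pairs, pv_group_items]
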